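-- pv_equiv track=rewrite | github.com/J-OFarrell/EcoFoodSystems-dashboard-development | app.py | _atlas_target_for_record
-- ===== SOURCE A (Python) =====
-- def _atlas_target_for_record(rec):
--     domain = (rec.get('Domain / Sub-theme') or '').lower()
--     theme = (rec.get('Theme') or '').lower()
--     name = (rec.get('Indicator name') or '').lower()
--
--     if 'stakeholder' in name or 'stakeholder' in domain:
--         return "Food Systems Stakeholders", "tab-1-stakeholders", None
--     if 'flow' in name or 'supply' in domain or 'value chain' in domain:
--         return "Food Flows & Supply Chains", "tab-2-supply", None
--     if 'poverty' in domain or 'multidimensional poverty' in domain: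
--         return "Multidimensional Poverty", "tab-4-poverty", None
--     if 'resilience' in domain or 'resilience' in theme:
--         resilience_text = f"{domain} {theme} {name}"
--         if any(k in resilience_text for k in ['Land-use & Land-cover distribution']):
--             return "Resilience Indicators", "tab-6-resilience", "Land-use & Land-cover"
--         if any(k in resilience_text for k in  ['Agricultural climate resilience indicator' , 'Water storage anomalies', 'Natural disasters database']):
--             return "Resilience Indicators", "tab-6-resilience", "Biophysical shocks"
--         if any(k in resilience_text for k in ['food price resilience indicator']):
--             return "Resilience Indicators", "tab-6-resilience", "Socio-Economic Shocks"
--         return "Resilience Indicators", "tab-6-resilience", "Resilience Indicator Trends"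
--     if 'food environments' in domain or 'afford' in name or 'afford' in domain or 'dietary mapping' in domain:
--         return "Food Environments", "tab-7-food-environments", None
--     if 'loss' in domain or 'waste' in domain:
--         return "Food Losses & Waste", "tab-8-losses", None
--     if 'policy' in name or 'polic' in domain or 'governance' in theme:
--         return "Policies & Regulation", "tab-9-policies", None
--     if 'nutrition' in domain or 'health' in domain or 'food safety' in domain:
--         return "Nutrition & Health", "tab-10-nutrition", None
--     if 'footprint' in domain or 'life cycle' in name:
--         return "Environmental Footprints", "tab-11-footprints", None
--     if 'behaviour' in domain or 'behavior' in domain or 'chatbot' in name or 'game' in name: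
--         return "Behaviour Change Tool (AI Chatbot & Game)", "tab-12-behaviour", None
--     if 'sustainability' in domain or 'sustainability' in name:
--         return "Sustainability Metrics", "tab-3-sustainability", None
--     return "Other Indicators", "tab-home", None
-- ===== SOURCE B (Python) =====
-- _RES = object()  # sentinel: resilience needs a second pass over the combined text
--
-- _OTHER = ("Other Indicators", "tab-home", None)
--
-- _D, _T, _N = 0, 1, 2  # indices into the (domain, theme, name) tuple
--
-- # Flat keyword table in priority order (highest first); scanned in REVERSE with
-- # an overwriting accumulator, so an earlier entry wins over any later match.
-- _TABLE = [
--     ('stakeholder', _N, ("Food Systems Stakeholders", "tab-1-stakeholders", None)),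
--     ('stakeholder', _D, ("Food Systems Stakeholders", "tab-1-stakeholders", None)),
--     ('flow', _N, ("Food Flows & Supply Chains", "tab-2-supply", None)),
--     ('supply', _D, ("Food Flows & Supply Chains", "tab-2-supply", None)),
--     ('value chain', _D, ("Food Flows & Supply Chains", "tab-2-supply", None)),
--     ('poverty', _D, ("Multidimensional Poverty", "tab-4-poverty", None)),
--     ('multidimensional poverty', _D, ("Multidimensional Poverty", "tab-4-poverty", None)),
--     ('resilience', _D, _RES),
--     ('resilience', _T, _RES),
--     ('food environments', _D, ("Food Environments", "tab-7-food-environments", None)),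
--     ('afford', _N, ("Food Environments", "tab-7-food-environments", None)),
--     ('afford', _D, ("Food Environments", "tab-7-food-environments", None)),
--     ('dietary mapping', _D, ("Food Environments", "tab-7-food-environments", None)),
--     ('loss', _D, ("Food Losses & Waste", "tab-8-losses", None)),
--     ('waste', _D, ("Food Losses & Waste", "tab-8-losses", None)),
--     ('policy', _N, ("Policies & Regulation", "tab-9-policies", None)),
--     ('polic', _D, ("Policies & Regulation", "tab-9-policies", None)),
--     ('governance', _T, ("Policies & Regulation", "tab-9-policies", None)),
--     ('nutrition', _D, ("Nutrition & Health", "tab-10-nutrition", None)),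
--     ('health', _D, ("Nutrition & Health", "tab-10-nutrition", None)),
--     ('food safety', _D, ("Nutrition & Health", "tab-10-nutrition", None)),
--     ('footprint', _D, ("Environmental Footprints", "tab-11-footprints", None)),
--     ('life cycle', _N, ("Environmental Footprints", "tab-11-footprints", None)),
--     ('behaviour', _D, ("Behaviour Change Tool (AI Chatbot & Game)", "tab-12-behaviour", None)),
--     ('behavior', _D, ("Behaviour Change Tool (AI Chatbot & Game)", "tab-12-behaviour", None)),
--     ('chatbot', _N, ("Behaviour Change Tool (AI Chatbot & Game)", "tab-12-behaviour", None)),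
--     ('game', _N, ("Behaviour Change Tool (AI Chatbot & Game)", "tab-12-behaviour", None)),
--     ('sustainability', _D, ("Sustainability Metrics", "tab-3-sustainability", None)),
--     ('sustainability', _N, ("Sustainability Metrics", "tab-3-sustainability", None)),
-- ]
--
-- # Resilience sub-label table, same reverse-overwrite scheme (keywords kept
-- # verbatim, mixed case included).
-- _RES_TABLE = [
--     ('Land-use & Land-cover distribution', "Land-use & Land-cover"),
--     ('Agricultural climate resilience indicator', "Biophysical shocks"),
--     ('Water storage anomalies', "Biophysical shocks"),
--     ('Natural disasters database', "Biophysical shocks"),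
--     ('food price resilience indicator', "Socio-Economic Shocks"),
-- ]
--
--
-- def _atlas_target_for_record(rec):
--     fields = (
--         (rec.get('Domain / Sub-theme') or '').lower(),
--         (rec.get('Theme') or '').lower(),
--         (rec.get('Indicator name') or '').lower(),
--     )
--     out = _OTHER
--     for kw, f, res in reversed(_TABLE):
--         if kw in fields[f]:
--             out = res
--     if out is not _RES:
--         return out
--     text = f"{fields[0]} {fields[1]} {fields[2]}"
--     sub = "Resilience Indicator Trends"
--     for kw, s in reversed(_RES_TABLE):
--         if kw in text:
--             sub = s
--     return "Resilience Indicators", "tab-6-resilience", sub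
-- ===== Notes on version B (the rewrite author's own statement) =====
-- stated objective: alternative
-- what changed: Replaced A's early-return if/elif chain by a single flat (keyword, field, result) table scanned in reverse priority order with an overwriting accumulator (the answer is built back-to-front, no early exit), the resilience sub-label computed the same way from its own flat table; every keyword, field and priority is kept identical.
import Mathlib
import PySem

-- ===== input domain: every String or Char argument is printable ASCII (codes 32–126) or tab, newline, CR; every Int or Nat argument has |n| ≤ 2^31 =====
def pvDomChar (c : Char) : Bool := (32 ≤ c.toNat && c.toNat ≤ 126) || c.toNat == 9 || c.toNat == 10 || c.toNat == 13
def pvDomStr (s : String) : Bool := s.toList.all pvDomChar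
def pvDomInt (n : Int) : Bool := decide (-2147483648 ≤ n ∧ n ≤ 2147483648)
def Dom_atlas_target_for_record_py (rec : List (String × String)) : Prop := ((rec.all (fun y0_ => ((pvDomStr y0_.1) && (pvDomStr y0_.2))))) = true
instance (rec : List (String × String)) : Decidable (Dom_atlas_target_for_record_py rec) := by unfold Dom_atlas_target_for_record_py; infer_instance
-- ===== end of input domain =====

-- B replaces A's early-return if-chain by a flat keyword table scanned in REVERSE with an
-- overwriting accumulator (the output is built back-to-front); same keywords, same cost (objective: alternative).

-- ===== PORT A =====
def atlas_target_for_record_py (rec : List (String × String)) : String × String × Option String :=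
  let domain := PySem.Str.lower ((PySem.Dict.mk rec).getD "Domain / Sub-theme" "")
  let theme := PySem.Str.lower ((PySem.Dict.mk rec).getD "Theme" "")
  let name := PySem.Str.lower ((PySem.Dict.mk rec).getD "Indicator name" "")
  if PySem.Str.isIn "stakeholder" name || PySem.Str.isIn "stakeholder" domain then
    ("Food Systems Stakeholders", "tab-1-stakeholders", none)
  else if PySem.Str.isIn "flow" name || PySem.Str.isIn "supply" domain || PySem.Str.isIn "value chain" domain then
    ("Food Flows & Supply Chains", "tab-2-supply", none)
  else if PySem.Str.isIn "poverty" domain || PySem.Str.isIn "multidimensional poverty" domain then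
    ("Multidimensional Poverty", "tab-4-poverty", none)
  else if PySem.Str.isIn "resilience" domain || PySem.Str.isIn "resilience" theme then
    let resilience_text := domain ++ " " ++ theme ++ " " ++ name
    if ["Land-use & Land-cover distribution"].any (fun k => PySem.Str.isIn k resilience_text) then
      ("Resilience Indicators", "tab-6-resilience", some "Land-use & Land-cover")
    else if ["Agricultural climate resilience indicator", "Water storage anomalies", "Natural disasters database"].any (fun k => PySem.Str.isIn k resilience_text) then
      ("Resilience Indicators", "tab-6-resilience", some "Biophysical shocks")
    else if ["food price resilience indicator"].any (fun k => PySem.Str.isIn k resilience_text) then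
      ("Resilience Indicators", "tab-6-resilience", some "Socio-Economic Shocks")
    else
      ("Resilience Indicators", "tab-6-resilience", some "Resilience Indicator Trends")
  else if PySem.Str.isIn "food environments" domain || PySem.Str.isIn "afford" name || PySem.Str.isIn "afford" domain || PySem.Str.isIn "dietary mapping" domain then
    ("Food Environments", "tab-7-food-environments", none)
  else if PySem.Str.isIn "loss" domain || PySem.Str.isIn "waste" domain then
    ("Food Losses & Waste", "tab-8-losses", none)
  else if PySem.Str.isIn "policy" name || PySem.Str.isIn "polic" domain || PySem.Str.isIn "governance" theme then
    ("Policies & Regulation", "tab-9-policies", none)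
  else if PySem.Str.isIn "nutrition" domain || PySem.Str.isIn "health" domain || PySem.Str.isIn "food safety" domain then
    ("Nutrition & Health", "tab-10-nutrition", none)
  else if PySem.Str.isIn "footprint" domain || PySem.Str.isIn "life cycle" name then
    ("Environmental Footprints", "tab-11-footprints", none)
  else if PySem.Str.isIn "behaviour" domain || PySem.Str.isIn "behavior" domain || PySem.Str.isIn "chatbot" name || PySem.Str.isIn "game" name then
    ("Behaviour Change Tool (AI Chatbot & Game)", "tab-12-behaviour", none)
  else if PySem.Str.isIn "sustainability" domain || PySem.Str.isIn "sustainability" name then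
    ("Sustainability Metrics", "tab-3-sustainability", none)
  else
    ("Other Indicators", "tab-home", none)

-- ===== PORT B =====
-- Source B's _RES sentinel vs real results is ported as Option: none = _RES, some r = a concrete triple.
def pvOther : String × String × Option String := ("Other Indicators", "tab-home", none)

-- Source B's _TABLE: (keyword, field index into (domain, theme, name), result or _RES sentinel)
def pvTable : List (String × Nat × Option (String × String × Option String)) :=
  [("stakeholder", 2, some ("Food Systems Stakeholders", "tab-1-stakeholders", none)),
   ("stakeholder", 0, some ("Food Systems Stakeholders", "tab-1-stakeholders", none)),
   ("flow", 2, some ("Food Flows & Supply Chains", "tab-2-supply", none)),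
   ("supply", 0, some ("Food Flows & Supply Chains", "tab-2-supply", none)),
   ("value chain", 0, some ("Food Flows & Supply Chains", "tab-2-supply", none)),
   ("poverty", 0, some ("Multidimensional Poverty", "tab-4-poverty", none)),
   ("multidimensional poverty", 0, some ("Multidimensional Poverty", "tab-4-poverty", none)),
   ("resilience", 0, none),
   ("resilience", 1, none),
   ("food environments", 0, some ("Food Environments", "tab-7-food-environments", none)),
   ("afford", 2, some ("Food Environments", "tab-7-food-environments", none)),
   ("afford", 0, some ("Food Environments", "tab-7-food-environments", none)),
   ("dietary mapping", 0, some ("Food Environments", "tab-7-food-environments", none)),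
   ("loss", 0, some ("Food Losses & Waste", "tab-8-losses", none)),
   ("waste", 0, some ("Food Losses & Waste", "tab-8-losses", none)),
   ("policy", 2, some ("Policies & Regulation", "tab-9-policies", none)),
   ("polic", 0, some ("Policies & Regulation", "tab-9-policies", none)),
   ("governance", 1, some ("Policies & Regulation", "tab-9-policies", none)),
   ("nutrition", 0, some ("Nutrition & Health", "tab-10-nutrition", none)),
   ("health", 0, some ("Nutrition & Health", "tab-10-nutrition", none)),
   ("food safety", 0, some ("Nutrition & Health", "tab-10-nutrition", none)),
   ("footprint", 0, some ("Environmental Footprints", "tab-11-footprints", none)),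
   ("life cycle", 2, some ("Environmental Footprints", "tab-11-footprints", none)),
   ("behaviour", 0, some ("Behaviour Change Tool (AI Chatbot & Game)", "tab-12-behaviour", none)),
   ("behavior", 0, some ("Behaviour Change Tool (AI Chatbot & Game)", "tab-12-behaviour", none)),
   ("chatbot", 2, some ("Behaviour Change Tool (AI Chatbot & Game)", "tab-12-behaviour", none)),
   ("game", 2, some ("Behaviour Change Tool (AI Chatbot & Game)", "tab-12-behaviour", none)),
   ("sustainability", 0, some ("Sustainability Metrics", "tab-3-sustainability", none)),
   ("sustainability", 2, some ("Sustainability Metrics", "tab-3-sustainability", none))]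

-- Source B's _RES_TABLE
def pvResTable : List (String × String) :=
  [("Land-use & Land-cover distribution", "Land-use & Land-cover"),
   ("Agricultural climate resilience indicator", "Biophysical shocks"),
   ("Water storage anomalies", "Biophysical shocks"),
   ("Natural disasters database", "Biophysical shocks"),
   ("food price resilience indicator", "Socio-Economic Shocks")]

def atlas_target_for_record_py_alt (rec : List (String × String)) : String × String × Option String :=
  let domain := PySem.Str.lower ((PySem.Dict.mk rec).getD "Domain / Sub-theme" "")
  let theme := PySem.Str.lower ((PySem.Dict.mk rec).getD "Theme" "")
  let name := PySem.Str.lower ((PySem.Dict.mk rec).getD "Indicator name" "")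
  let fields : List String := [domain, theme, name]
  -- reverse scan with overwriting accumulator (fields tuple index is always 0/1/2, so getD is exact)
  let out : Option (String × String × Option String) :=
    pvTable.reverse.foldl (fun acc e => if PySem.Str.isIn e.1 (fields.getD e.2.1 "") then e.2.2 else acc) (some pvOther)
  -- 'if out is not _RES: return out' else the resilience second pass; ported as Option.getD
  out.getD
    (let text := domain ++ " " ++ theme ++ " " ++ name
     let sub := pvResTable.reverse.foldl (fun acc e => if PySem.Str.isIn e.1 text then e.2 else acc) "Resilience Indicator Trends"
     ("Resilience Indicators", "tab-6-resilience", some sub))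

-- ===== PRECONDITION & SPEC =====
def Spec_atlas_target_for_record_py (rec : List (String × String)) (out : String × String × Option String) : Prop := out = atlas_target_for_record_py_alt rec
instance (rec : List (String × String)) (out : String × String × Option String) : Decidable (Spec_atlas_target_for_record_py rec out) := by unfold Spec_atlas_target_for_record_py; infer_instance

-- ===== CLAIM (what is proved, stated in full; the proofs are below) =====
def Claim_equal_atlas_target_for_record_py : Prop := ∀ (rec : List (String × String)), Dom_atlas_target_for_record_py rec → Spec_atlas_target_for_record_py rec (atlas_target_for_record_py rec)

-- ===== LEMMAS AND PROOFS =====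
-- first-match recursion: what the reverse overwriting fold computes
def pvFirstM {α β : Type} (p : α → Bool) (r : α → β) (init : β) : List α → β
  | [] => init
  | e :: rest => if p e then r e else pvFirstM p r init rest

theorem pv_rev_foldl_eq_firstM {α β : Type} (p : α → Bool) (r : α → β) (init : β) (l : List α) :
    l.reverse.foldl (fun acc e => if p e then r e else acc) init = pvFirstM p r init l := by
  induction l with
  | nil => rfl
  | cons e rest ih =>
      simp only [List.reverse_cons, List.foldl_append, List.foldl_cons, List.foldl_nil, pvFirstM, ih]

theorem pv_if_or {β : Type} (a b : Bool) (x y : β) :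
    (if a || b then x else y) = (if a then x else if b then x else y) := by
  cases a <;> simp

theorem pv_getD_ite {β : Type} (c : Prop) [Decidable c] (a b : Option β) (d : β) :
    (if c then a else b).getD d = if c then a.getD d else b.getD d := by
  split_ifs <;> rfl

theorem pv_some_ite {β : Type} (c : Prop) [Decidable c] (a b : β) :
    (some (if c then a else b) : Option β) = if c then some a else some b := by
  split_ifs <;> rfl

theorem pv_pair_ite {β γ : Type} (x : γ) (c : Prop) [Decidable c] (a b : β) :
    ((x, if c then a else b) : γ × β) = if c then (x, a) else (x, b) := by
  split_ifs <;> rfl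

-- ===== VERDICT (by name: the statement is the Claim_ definition above) =====
set_option maxRecDepth 16000 in
set_option maxHeartbeats 2000000 in
theorem atlas_target_for_record_py_spec : Claim_equal_atlas_target_for_record_py := by
  intro rec _
  unfold Spec_atlas_target_for_record_py atlas_target_for_record_py atlas_target_for_record_py_alt
  simp only [pv_rev_foldl_eq_firstM]
  simp only [pvTable, pvResTable, pvFirstM, pvOther, List.getD,
    List.getElem?_cons_zero, List.getElem?_cons_succ]
  simp only [pv_some_ite, pv_pair_ite, pv_getD_ite, Option.getD_some, Option.getD_none,
    List.any_cons, List.any_nil, Bool.or_false, pv_if_or]
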